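-- pv_equiv track=rewrite | github.com/fondefpuentes/Sistema-SHM | Subsistema Datos Recientes/dataframe.py | crear_hora
-- ===== SOURCE A (Python) =====
-- def crear_hora(hora):
--     hora_new = '00:00:00'
--     if hora == 24:
--         hora_new = '00:00:00'
--     else:
--         for i in range(24):
--             if hora == i and hora < 10:
--                 hora_new = '0'+str(i)+':00:00'
--             elif hora == i and hora > 9:
--                 hora_new = str(i)+':00:00'
--     return hora_new
-- ===== SOURCE B (Python) =====
-- def crear_hora(hora):
--     # Direct closed-form check instead of scanning range(24).
--     if 0 <= hora <= 23:
--         return f"{int(hora):02d}:00:00"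
--     return '00:00:00'
-- ===== Notes on version B (the rewrite author's own statement) =====
-- stated objective: simpler
-- what changed: Replace the scan over range(24) with a direct bounds check on the hour and a single zero-padded format, removing the loop entirely.
import Mathlib
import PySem

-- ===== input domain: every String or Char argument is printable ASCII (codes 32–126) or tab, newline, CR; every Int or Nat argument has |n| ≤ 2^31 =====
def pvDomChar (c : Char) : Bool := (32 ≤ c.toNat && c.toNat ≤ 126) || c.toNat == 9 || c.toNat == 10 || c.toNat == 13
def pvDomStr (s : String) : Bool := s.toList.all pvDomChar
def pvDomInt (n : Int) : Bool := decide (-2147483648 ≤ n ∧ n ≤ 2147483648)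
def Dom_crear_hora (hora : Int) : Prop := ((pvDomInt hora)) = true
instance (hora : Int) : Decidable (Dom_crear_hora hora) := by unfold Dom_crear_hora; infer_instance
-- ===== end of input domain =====

-- B replaces A's scan over range(24) with a direct bounds check and one padded format (simpler, same values).


-- ===== PORT A =====
def crear_hora (hora : Int) : String :=
  let hora_new := "00:00:00"
  if hora = 24 then "00:00:00"
  else
    (PySem.List.pyRange 0 24 1).foldl (fun acc i =>
      if hora = i ∧ hora < 10 then "0" ++ PySem.Int.toStr i ++ ":00:00"
      else if hora = i ∧ hora > 9 then PySem.Int.toStr i ++ ":00:00"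
      else acc) hora_new

-- ===== PORT B =====
def crear_hora_alt (hora : Int) : String :=
  if 0 ≤ hora ∧ hora ≤ 23 then
    -- f"{hora:02d}:00:00": zero-pad to width 2 (hora is nonnegative here)
    (if hora < 10 then "0" ++ PySem.Int.toStr hora else PySem.Int.toStr hora) ++ ":00:00"
  else "00:00:00"

-- ===== PRECONDITION & SPEC =====
def Spec_crear_hora (hora : Int) (out : String) : Prop := out = crear_hora_alt hora
instance (hora : Int) (out : String) : Decidable (Spec_crear_hora hora out) := by unfold Spec_crear_hora; infer_instance

-- ===== CLAIM (what is proved, stated in full; the proofs are below) =====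
def Claim_equal_crear_hora : Prop := ∀ (hora : Int), Dom_crear_hora hora → Spec_crear_hora hora (crear_hora hora)

-- ===== LEMMAS AND PROOFS =====

-- A's loop leaves the accumulator unchanged when hora matches no element of the list.
theorem pv_fold_const (hora : Int) (l : List Int) (acc : String)
    (h : ∀ i ∈ l, hora ≠ i) :
    l.foldl (fun acc i =>
      if hora = i ∧ hora < 10 then "0" ++ PySem.Int.toStr i ++ ":00:00"
      else if hora = i ∧ hora > 9 then PySem.Int.toStr i ++ ":00:00"
      else acc) acc = acc := by
  induction l generalizing acc with
  | nil => rfl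
  | cons x xs ih =>
    have hx : hora ≠ x := h x (List.mem_cons_self)
    simp only [List.foldl_cons]
    rw [if_neg (by exact fun hc => hx hc.1), if_neg (by exact fun hc => hx hc.1)]
    exact ih _ (fun i hi => h i (List.mem_cons_of_mem _ hi))

-- ===== VERDICT (by name: the statement is the Claim_ definition above) =====
theorem crear_hora_spec : Claim_equal_crear_hora := by
  intro hora _
  unfold Spec_crear_hora
  by_cases hin : 0 ≤ hora ∧ hora ≤ 23
  · obtain ⟨h0, h1⟩ := hin
    interval_cases hora <;> decide
  · by_cases h24 : hora = 24
    · subst h24; decide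
    · unfold crear_hora crear_hora_alt
      rw [if_neg hin, if_neg h24]
      exact pv_fold_const hora _ _ (by
        intro i hi
        rw [PySem.List.mem_pyRange_one] at hi
        omega)
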